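-- pv_equiv track=rewrite | github.com/vallettea/koala | koala/utils.py | num2col
-- ===== SOURCE A (Python) =====
-- import string
--
-- num2col_cache = {}
--
-- def num2col(num):
--     """"""
--     # TODO: add pydoc
--     # TODO: add logging
--     # TODO: expand single letter variable names to something more meaningful
--
--     if num in num2col_cache:
--         return num2col_cache[num]
--     else:
--         if num < 1:
--             raise Exception("Column ordinal must be larger than 0: %s" % num)
--
--         elif num > 16384:
--             raise Exception("Column ordinal must be less than than 16384: %s" % num)
--
--         s = ''
--         q = num
--         while q > 0:
--             (q,r) = divmod(q,26)
--             if r == 0: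
--                 q = q - 1
--                 r = 26
--             s = string.ascii_uppercase[r-1] + s
--
--         num2col_cache[num] = s
--         return s
-- ===== SOURCE B (Python) =====
-- import string
--
-- def num2col(num):
--     if num < 1:
--         raise Exception("Column ordinal must be larger than 0: %s" % num)
--     if num > 16384:
--         raise Exception("Column ordinal must be less than than 16384: %s" % num)
--
--     def helper(n):
--         if n <= 0:
--             return ''
--         q, r = divmod(n - 1, 26)
--         return helper(q) + string.ascii_uppercase[r]
--
--     return helper(num)
-- ===== Notes on version B (the rewrite author's own statement) =====
-- stated objective: simpler
-- what changed: Replaces the while-loop with its r==0 post-correction (q-=1, r=26) by a recursive helper over divmod(n-1,26), which folds the correction into the subtraction and drops the memoization cache.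
import Mathlib
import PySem

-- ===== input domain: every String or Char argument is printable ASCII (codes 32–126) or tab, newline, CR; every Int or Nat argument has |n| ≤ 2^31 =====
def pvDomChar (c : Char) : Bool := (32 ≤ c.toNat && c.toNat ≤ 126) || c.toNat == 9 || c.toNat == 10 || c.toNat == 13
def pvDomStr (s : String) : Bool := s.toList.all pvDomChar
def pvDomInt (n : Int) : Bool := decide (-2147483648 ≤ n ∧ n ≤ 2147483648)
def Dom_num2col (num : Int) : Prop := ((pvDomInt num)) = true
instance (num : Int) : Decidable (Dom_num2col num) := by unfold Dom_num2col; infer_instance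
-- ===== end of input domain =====

-- B replaces A's while-loop (with r==0 correction) by a recursive helper over divmod(n-1,26); A memoizes
-- in a module-level cache (a side effect not modelled here; return value is unchanged).

-- ===== PORT A =====
-- string.ascii_uppercase indexing: index r-1 is provably in 0..25 whenever the loop runs, so getD is exact.
def pvUpper : List Char := "ABCDEFGHIJKLMNOPQRSTUVWXYZ".toList

-- the while-loop of A: state (q, s); q strictly decreases while q > 0
def num2colLoop (q : Int) (s : List Char) : List Char :=
  if h : q > 0 then
    let q' := PySem.Int.floordiv q 26
    let r := PySem.Int.mod q 26
    if r = 0 then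
      num2colLoop (q' - 1) (((PySem.List.pyGet? pvUpper (26 - 1)).getD 'A') :: s)
    else
      num2colLoop q' (((PySem.List.pyGet? pvUpper (r - 1)).getD 'A') :: s)
  else s
termination_by q.toNat
decreasing_by
  all_goals
    rw [PySem.Int.floordiv_eq_ediv_of_pos (by omega : (0:Int) < 26)]
    omega

def num2col (num : Int) : String :=
  -- the cache branch returns the identical value, so only the computing branch is ported
  String.ofList (num2colLoop num [])

-- ===== PORT B =====
def num2colHelper (n : Int) : List Char :=
  if h : n ≤ 0 then []
  else
    let q := PySem.Int.floordiv (n - 1) 26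
    let r := PySem.Int.mod (n - 1) 26
    num2colHelper q ++ [(PySem.List.pyGet? pvUpper r).getD 'A']
termination_by n.toNat
decreasing_by
  rw [PySem.Int.floordiv_eq_ediv_of_pos (by omega : (0:Int) < 26)]
  omega

def num2col_alt (num : Int) : String :=
  String.ofList (num2colHelper num)

-- ===== PRECONDITION & SPEC =====
-- A raises Exception for num < 1 and for num > 16384; exactly those inputs are excluded.
def Pre_num2col (num : Int) : Prop := 1 ≤ num ∧ num ≤ 16384
instance (num : Int) : Decidable (Pre_num2col num) := by unfold Pre_num2col; infer_instance
def pvWitness_num2col : Int := (703)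

def Spec_num2col (num : Int) (out : String) : Prop := out = num2col_alt num
instance (num : Int) (out : String) : Decidable (Spec_num2col num out) := by unfold Spec_num2col; infer_instance

-- ===== CLAIM (what is proved, stated in full; the proofs are below) =====
def Claim_equal_num2col : Prop := ∀ (num : Int), Dom_num2col num → Pre_num2col num → Spec_num2col num (num2col num)

-- ===== LEMMAS AND PROOFS =====

-- key invariant: for q ≥ 0 the loop prepends exactly helper's digits to s
theorem loop_eq_helper (k : Nat) (q : Int) (hq : 0 ≤ q) (hk : q.toNat = k) (s : List Char) :
    num2colLoop q s = num2colHelper q ++ s := by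
  induction k using Nat.strong_induction_on generalizing q s with
  | _ k ih =>
    rw [num2colLoop, num2colHelper]
    by_cases h : q > 0
    · have h26 : (0:Int) < 26 := by omega
      rw [dif_pos h, dif_neg (by omega : ¬ q ≤ 0)]
      rw [PySem.Int.floordiv_eq_ediv_of_pos h26, PySem.Int.floordiv_eq_ediv_of_pos h26,
          PySem.Int.mod_eq_emod_of_pos h26, PySem.Int.mod_eq_emod_of_pos h26]
      by_cases hr : q % 26 = 0
      · rw [if_pos hr]
        have e1 : (q - 1) / 26 = q / 26 - 1 := by omega
        have e2 : (q - 1) % 26 = 25 := by omega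
        rw [e1, e2, ih (q / 26 - 1).toNat (by omega) _ (by omega) rfl,
            show ((26:Int) - 1) = (25:Int) by norm_num]
        simp
      · rw [if_neg hr]
        have e1 : (q - 1) / 26 = q / 26 := by omega
        have e2 : (q - 1) % 26 = q % 26 - 1 := by omega
        rw [e1, e2, ih (q / 26).toNat (by omega) _ (by omega) rfl]
        simp
    · rw [dif_neg h, dif_pos (by omega : q ≤ 0)]
      simp

theorem num2col_spec : Claim_equal_num2col := by
  intro num _ hpre
  obtain ⟨h1, -⟩ := hpre
  unfold Spec_num2col num2col num2col_alt
  rw [loop_eq_helper num.toNat num (by omega) rfl, List.append_nil]
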